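-- pv_equiv track=rewrite | github.com/Noor-Fatima-Afzal/python-practice-tasks | practice/lyrics.py | worrd_often
-- ===== SOURCE A (Python) =====
-- def most_common_words(freq):
--     values=freq.values()
--     best=max(freq.values())
--     words=[]
--     for k in freq:
--         if freq[k]==best:
--             words.append(k)
--     return (words,best)
--
-- def worrd_often(freq,min):
--     result=[]
--     done=False
--     while not done:
--         temp=most_common_words(freq)
--         if temp[1]>=min:
--             result.append(temp)
--             for w in temp[0]:
--                 del(freq[w])
--         else:
--             done=True
--     return result
-- ===== SOURCE B (Python) =====
-- def worrd_often(freq, min):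
--     buckets = {}
--     for w, c in freq.items():
--         buckets.setdefault(c, []).append(w)
--     return [(ws, c)
--             for c, ws in sorted(buckets.items(), key=lambda t: t[0], reverse=True)
--             if c >= min]
-- ===== Notes on version B (the rewrite author's own statement) =====
-- stated objective: alternative
-- what changed: A repeatedly scans the dict for the current maximum frequency and deletes that group until the max drops below min; B builds frequency buckets in one pass, sorts the distinct frequencies descending once, and emits the buckets while the frequency is >= min.
import Mathlib
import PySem

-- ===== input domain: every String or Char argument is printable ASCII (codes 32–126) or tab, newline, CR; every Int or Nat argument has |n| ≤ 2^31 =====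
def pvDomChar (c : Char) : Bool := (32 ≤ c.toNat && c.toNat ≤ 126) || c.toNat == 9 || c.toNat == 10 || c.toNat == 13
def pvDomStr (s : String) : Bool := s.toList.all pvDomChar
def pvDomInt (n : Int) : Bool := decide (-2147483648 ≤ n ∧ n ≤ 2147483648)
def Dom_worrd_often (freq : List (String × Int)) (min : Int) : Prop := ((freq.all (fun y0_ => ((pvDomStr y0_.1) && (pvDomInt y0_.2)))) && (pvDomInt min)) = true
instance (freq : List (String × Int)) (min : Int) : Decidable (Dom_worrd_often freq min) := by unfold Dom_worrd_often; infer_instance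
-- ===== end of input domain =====

-- B buckets the words by frequency in one pass and sorts the distinct frequencies once,
-- instead of A's repeated max-scan-and-delete passes (note: Python A also empties its dict
-- argument in place; the equivalence proved here is about the RETURN value only — B does
-- not mutate its argument).

-- ===== PORT A =====
def pvMostCommonWords (freq : PySem.Dict String Int) : Option (List String × Int) :=
  match PySem.List.max? freq.values (fun v => v) with
  | none => none  -- max() of an empty sequence: ValueError (Pre_ excludes reaching this)
  | some best =>
      some (freq.keys.foldl
              (fun words k => if freq.getD k 0 == best then words ++ [k] else words) [],
            best)

def pvWorrdLoop (fuel : Nat) (freq : PySem.Dict String Int) (min : Int)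
    (result : List (List String × Int)) : List (List String × Int) :=
  match fuel with
  | 0 => result  -- never reached: each pass deletes ≥ 1 key, and fuel = |freq| + 1
  | fuel + 1 =>
    match pvMostCommonWords freq with
    | none => result  -- Python raises ValueError here (outside Pre_)
    | some temp =>
      if min ≤ temp.2 then
        pvWorrdLoop fuel (temp.1.foldl (fun d w => d.erase w) freq) min (result ++ [temp])
      else result

def worrd_often (freq : List (String × Int)) (min : Int) : List (List String × Int) :=
  pvWorrdLoop (freq.length + 1) (PySem.Dict.ofList freq) min []

-- ===== PORT B =====
def worrd_often_alt (freq : List (String × Int)) (min : Int) : List (List String × Int) :=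
  let d := PySem.Dict.ofList freq
  let buckets : PySem.Dict Int (List String) :=
    d.items.foldl (fun b p => b.insert p.2 (b.getD p.2 [] ++ [p.1])) PySem.Dict.empty
  ((PySem.List.sorted buckets.items (fun t => t.1) true).filter
      (fun t => decide (min ≤ t.1))).map (fun t => (t.2, t.1))

-- ===== PRECONDITION & SPEC =====
-- Pre_ excludes exactly the inputs on which Python A raises ValueError (max() of an empty
-- sequence): an empty dict, or a dict whose every value is ≥ min, so the loop empties it.
def Pre_worrd_often (freq : List (String × Int)) (min : Int) : Prop :=
  ∃ p ∈ (PySem.Dict.ofList freq).items, p.2 < min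
instance (freq : List (String × Int)) (min : Int) : Decidable (Pre_worrd_often freq min) := by
  unfold Pre_worrd_often; infer_instance
def pvWitness_worrd_often : (List (String × Int)) × Int := ([("a", 0)], 1)

def Spec_worrd_often (freq : List (String × Int)) (min : Int) (out : List (List String × Int)) : Prop := out = worrd_often_alt freq min
instance (freq : List (String × Int)) (min : Int) (out : List (List String × Int)) : Decidable (Spec_worrd_often freq min out) := by unfold Spec_worrd_often; infer_instance

-- ===== CLAIM (what is proved, stated in full; the proofs are below) =====
def Claim_equal_worrd_often : Prop := ∀ (freq : List (String × Int)) (min : Int), Dom_worrd_often freq min → Pre_worrd_often freq min → Spec_worrd_often freq min (worrd_often freq min)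

-- ===== LEMMAS AND PROOFS =====
-- Both results are shown equal to pvSpec: the distinct frequencies in descending order,
-- cut below min, each paired with its words in dict insertion order.

def pvGroup (l : List (String × Int)) (v : Int) : List String :=
  (l.filter (fun p => p.2 == v)).map Prod.fst

def pvVals (l : List (String × Int)) : List Int :=
  PySem.List.sorted (PySem.Set.ofList (l.map Prod.snd)) (fun v => v) true

def pvSpec (l : List (String × Int)) (min : Int) : List (List String × Int) :=
  ((pvVals l).filter (fun v => decide (min ≤ v))).map (fun v => (pvGroup l v, v))

theorem pvVals_pairwise (l : List (String × Int)) :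
    List.Pairwise (fun a b => b < a) (pvVals l) := by
  have h1 := PySem.List.sorted_pairwise_rev (PySem.Set.ofList (l.map Prod.snd)) (fun v : Int => v)
  have h2 : (pvVals l).Nodup :=
    ((PySem.List.sorted_perm _ _ _).nodup_iff).2 (PySem.Set.nodup_ofList _)
  exact (h2.and h1).imp (fun h => by omega)

theorem pvMax_of_vals (d : PySem.Dict String Int) (b : Int) (rest : List Int)
    (h : pvVals d.items = b :: rest) :
    PySem.List.max? d.values (fun v => v) = some b := by
  have hvals : d.values = d.items.map Prod.snd := rfl
  have hble : ∀ y ∈ PySem.Set.ofList (d.items.map Prod.snd), y ≤ b :=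
    PySem.List.key_head_sorted_rev_ge _ _ h
  have hbmem : b ∈ PySem.Set.ofList (d.items.map Prod.snd) := by
    have := PySem.List.sorted_perm (PySem.Set.ofList (d.items.map Prod.snd)) (fun v : Int => v) true
    rw [pvVals] at h
    exact (this.mem_iff).1 (h ▸ List.mem_cons_self)
  have hne : d.items.map Prod.snd ≠ [] :=
    List.ne_nil_of_mem ((PySem.Set.mem_ofList _ _).1 hbmem)
  obtain ⟨m, hm⟩ : ∃ m, PySem.List.max? (d.items.map Prod.snd) (fun v => v) = some m := by
    cases hmax : PySem.List.max? (d.items.map Prod.snd) (fun v : Int => v) with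
    | none => exact absurd ((PySem.List.max?_eq_none_iff _ _).1 hmax) hne
    | some m => exact ⟨m, rfl⟩
  rw [hvals, hm]
  have h1 : m ≤ b := hble m ((PySem.Set.mem_ofList _ _).2 (PySem.List.max?_mem hm))
  have h2 : b ≤ m := PySem.List.max?_isMax hm b ((PySem.Set.mem_ofList _ _).1 hbmem)
  rw [le_antisymm h1 h2]

theorem pvWords_eq_group (d : PySem.Dict String Int) (hn : d.keys.Nodup) (b : Int) :
    d.keys.foldl (fun words k => if d.getD k 0 == b then words ++ [k] else words) []
      = pvGroup d.items b := by
  rw [PySem.List.foldl_append_if_eq_filter (fun k => d.getD k 0 == b) d.keys []]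
  have hkeys : d.keys = d.items.map Prod.fst := rfl
  rw [hkeys, List.filter_map]
  rw [pvGroup, List.filter_congr (fun p hp => ?_)]
  · rfl
  · show (d.getD p.1 0 == b) = (p.2 == b)
    rw [PySem.Dict.getD_of_mem_items d (by exact hp) hn 0]

theorem pvErase_items (ws : List String) (d : PySem.Dict String Int) :
    (ws.foldl (fun d w => d.erase w) d).items
      = d.items.filter (fun p => !ws.contains p.1) := by
  induction ws generalizing d with
  | nil => simp
  | cons w t ih =>
    rw [List.foldl_cons, ih]
    show (d.erase w).items.filter _ = _
    rw [show (d.erase w).items = d.items.filter (fun p => !(p.1 == w)) from rfl,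
        List.filter_filter]
    refine List.filter_congr (fun p _ => ?_)
    by_cases hw : p.1 = w <;> by_cases ht : p.1 ∈ t <;> simp [hw, ht]

theorem pvErase_group_items (d : PySem.Dict String Int) (hn : d.keys.Nodup) (b : Int) :
    ((pvGroup d.items b).foldl (fun d w => d.erase w) d).items
      = d.items.filter (fun p => !(p.2 == b)) := by
  rw [pvErase_items]
  refine List.filter_congr (fun p hp => ?_)
  congr 1
  show (pvGroup d.items b).contains p.1 = (p.2 == b)
  rw [show ∀ (l : List String) (x : String), l.contains x = decide (x ∈ l) from
        fun l x => by simp]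
  by_cases hb : p.2 = b
  · simp only [hb, beq_self_eq_true]
    apply decide_eq_true
    exact List.mem_map.2 ⟨p, List.mem_filter.2 ⟨hp, by simp [hb]⟩, rfl⟩
  · simp only [beq_eq_false_iff_ne.2 hb]
    apply decide_eq_false
    intro hmem
    obtain ⟨q, hq, hq1⟩ := List.mem_map.1 hmem
    obtain ⟨hqi, hq2⟩ := List.mem_filter.1 hq
    have : q = p := List.inj_on_of_nodup_map (f := Prod.fst) (by exact hn) hqi hp hq1
    rw [this] at hq2
    exact hb (by simpa using hq2)

theorem pvSet_ofList_filter (p : Int → Bool) (l : List Int) :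
    PySem.Set.ofList (l.filter p) = (PySem.Set.ofList l).filter p := by
  have h : ∀ (l : List Int) (s : PySem.Set Int),
      (l.filter p).foldl PySem.Set.add (s.filter p) = (l.foldl PySem.Set.add s).filter p := by
    intro l
    induction l with
    | nil => simp
    | cons x t ih =>
      intro s
      by_cases hx : p x = true
      · rw [List.filter_cons_of_pos hx, List.foldl_cons, List.foldl_cons,
          show PySem.Set.add (List.filter p s) x = List.filter p (PySem.Set.add s x) by
            simp only [PySem.Set.add, PySem.Set.contains, List.contains_iff_mem]
            by_cases hc : x ∈ s
            · simp [hc, List.mem_filter, hx]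
            · simp [hc, List.mem_filter, hx, List.filter_append]]
        exact ih _
      · rw [List.filter_cons_of_neg (by simp [hx]), List.foldl_cons,
          show List.filter p s = List.filter p (PySem.Set.add s x) by
            simp only [PySem.Set.add]
            split
            · rfl
            · rw [List.filter_append, List.filter_cons_of_neg (by simp [hx])]
              simp]
        exact ih _
  simpa using h l []

theorem pvVals_tail (l : List (String × Int)) (b : Int) (rest : List Int)
    (h : pvVals l = b :: rest) :
    pvVals (l.filter (fun p => !(p.2 == b))) = rest := by
  have h' : PySem.List.sorted (PySem.Set.ofList (l.map Prod.snd)) (fun v : Int => v) true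
      = b :: rest := h
  have hperm : (PySem.Set.ofList (l.map Prod.snd)).Perm (b :: rest) :=
    h' ▸ (PySem.List.sorted_perm (PySem.Set.ofList (l.map Prod.snd)) (fun v : Int => v) true).symm
  have hnodup : (b :: rest).Nodup := hperm.nodup_iff.1 (PySem.Set.nodup_ofList _)
  have hbrest : b ∉ rest := (List.nodup_cons.1 hnodup).1
  have hp := pvVals_pairwise l
  rw [h] at hp
  show PySem.List.sorted (PySem.Set.ofList ((l.filter _).map Prod.snd)) (fun v : Int => v) true = rest
  rw [show (l.filter (fun p => !(p.2 == b))).map Prod.snd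
        = (l.map Prod.snd).filter (fun v => !(v == b)) from
      (List.filter_map (f := Prod.snd) (p := fun v => !(v == b))).symm,
    pvSet_ofList_filter]
  refine PySem.List.sorted_rev_eq_of_perm_of_pairwise_gt _ rest _ ?_ ?_
  · have h2 : (b :: rest).filter (fun v => !(v == b)) = rest := by
      rw [List.filter_cons_of_neg (by simp)]
      refine List.filter_eq_self.2 (fun x hx => ?_)
      simp only [Bool.not_eq_eq_eq_not, Bool.not_true, beq_eq_false_iff_ne]
      rintro rfl
      exact hbrest hx
    exact (h2 ▸ hperm.filter (fun v => !(v == b))).symm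
  · exact (List.pairwise_cons.1 hp).2

theorem pvGroup_filter (l : List (String × Int)) (b v : Int) (hv : v ≠ b) :
    pvGroup (l.filter (fun p => !(p.2 == b))) v = pvGroup l v := by
  rw [pvGroup, pvGroup, List.filter_filter]
  congr 1
  refine List.filter_congr (fun p _ => ?_)
  by_cases h : p.2 = v <;> simp [h, hv]

theorem pvSet_nil (xs : List Int) (h : PySem.Set.ofList xs = []) : xs = [] := by
  cases xs with
  | nil => rfl
  | cons y t =>
    exact absurd ((PySem.Set.mem_ofList (y :: t) y).2 List.mem_cons_self) (by simp [h])

theorem pvEmpty_case (fuel : Nat) (d : PySem.Dict String Int) (m : Int)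
    (acc : List (List String × Int)) (hitems : d.items = []) :
    pvWorrdLoop (fuel + 1) d m acc = acc ++ pvSpec d.items m := by
  have hv : d.values = [] := by simp [PySem.Dict.values, hitems]
  have hmost : pvMostCommonWords d = none := by
    unfold pvMostCommonWords
    rw [hv]
    rfl
  have hspec : pvSpec d.items m = [] := by simp [pvSpec, pvVals, hitems]
  rw [hspec]
  simp [pvWorrdLoop, hmost]

theorem pvLoop_eq_spec (n : Nat) : ∀ (fuel : Nat) (d : PySem.Dict String Int)
    (m : Int) (acc : List (List String × Int)),
    d.keys.Nodup → (PySem.Set.ofList d.values).length ≤ n → n < fuel →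
    pvWorrdLoop fuel d m acc = acc ++ pvSpec d.items m := by
  induction n with
  | zero =>
    intro fuel d m acc hn hlen hf
    obtain ⟨f, rfl⟩ : ∃ f, fuel = f + 1 := ⟨fuel - 1, by omega⟩
    have hitems : d.items = [] := by
      have := pvSet_nil _ (List.length_eq_zero_iff.1 (Nat.le_zero.1 hlen))
      simpa [PySem.Dict.values] using List.map_eq_nil_iff.1 this
    exact pvEmpty_case f d m acc hitems
  | succ n ih =>
    intro fuel d m acc hn hlen hf
    obtain ⟨f, rfl⟩ : ∃ f, fuel = f + 1 := ⟨fuel - 1, by omega⟩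
    by_cases hitems : d.items = []
    · exact pvEmpty_case f d m acc hitems
    · obtain ⟨b, rest, hbr⟩ : ∃ b rest, pvVals d.items = b :: rest := by
        cases hv : pvVals d.items with
        | nil =>
          exfalso
          have := (PySem.List.sorted_eq_nil_iff _ _ _).1 hv
          exact hitems (List.map_eq_nil_iff.1 (pvSet_nil _ this))
        | cons b rest => exact ⟨b, rest, rfl⟩
      have hmost : pvMostCommonWords d = some (pvGroup d.items b, b) := by
        unfold pvMostCommonWords
        rw [pvMax_of_vals d b rest hbr]
        exact congrArg (fun w => some (w, b)) (pvWords_eq_group d hn b)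
      have hlenV : (PySem.Set.ofList d.values).length = rest.length + 1 := by
        have := (PySem.List.sorted_perm (PySem.Set.ofList (d.items.map Prod.snd))
          (fun v : Int => v) true).length_eq
        rw [show PySem.List.sorted (PySem.Set.ofList (d.items.map Prod.snd))
              (fun v : Int => v) true = pvVals d.items from rfl, hbr] at this
        simpa [PySem.Dict.values] using this.symm
      by_cases hmb : m ≤ b
      · set d' := (pvGroup d.items b).foldl (fun d w => d.erase w) d with hd'
        have hd'items : d'.items = d.items.filter (fun p => !(p.2 == b)) :=
          pvErase_group_items d hn b
        have hd'nodup : d'.keys.Nodup := by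
          have : d'.keys = (d.items.filter (fun p => !(p.2 == b))).map Prod.fst := by
            rw [show d'.keys = d'.items.map Prod.fst from rfl, hd'items]
          rw [this]
          exact ((List.filter_sublist).map Prod.fst).nodup hn
        have hd'vals : pvVals d'.items = rest := by
          rw [hd'items]; exact pvVals_tail d.items b rest hbr
        have hd'len : (PySem.Set.ofList d'.values).length ≤ n := by
          have := (PySem.List.sorted_perm (PySem.Set.ofList (d'.items.map Prod.snd))
            (fun v : Int => v) true).length_eq
          rw [show PySem.List.sorted (PySem.Set.ofList (d'.items.map Prod.snd))
                (fun v : Int => v) true = pvVals d'.items from rfl, hd'vals] at this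
          have hle : rest.length + 1 ≤ n + 1 := by rw [← hlenV]; exact hlen
          simpa [PySem.Dict.values] using le_trans (le_of_eq this.symm) (by omega)
        have hrec := ih f d' m (acc ++ [(pvGroup d.items b, b)]) hd'nodup hd'len (by omega)
        have hspec : pvSpec d.items m = (pvGroup d.items b, b) :: pvSpec d'.items m := by
          rw [pvSpec, hbr, List.filter_cons_of_pos (by simpa using hmb), List.map_cons]
          congr 1
          rw [pvSpec, hd'vals]
          refine (List.map_congr_left (fun v hv => ?_)).symm
          have hvrest : v ∈ rest := List.mem_of_mem_filter hv
          have hnodup : (b :: rest).Nodup := by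
            rw [← hbr]
            exact ((PySem.List.sorted_perm _ _ _).nodup_iff).2 (PySem.Set.nodup_ofList _)
          have hvne : v ≠ b := fun h => (List.nodup_cons.1 hnodup).1 (h ▸ hvrest)
          rw [hd'items, pvGroup_filter d.items b v hvne]
        show pvWorrdLoop (f + 1) d m acc = acc ++ pvSpec d.items m
        rw [show pvWorrdLoop (f + 1) d m acc
              = pvWorrdLoop f d' m (acc ++ [(pvGroup d.items b, b)]) by
            simp [pvWorrdLoop, hmost, hmb, hd']]
        rw [hrec, hspec]
        simp
      · have hspec : pvSpec d.items m = [] := by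
          rw [pvSpec, List.filter_eq_nil_iff.2 ?_]
          · rfl
          · intro v hv
            have hble := PySem.List.key_head_sorted_rev_ge _ _
              (show PySem.List.sorted (PySem.Set.ofList (d.items.map Prod.snd))
                  (fun v : Int => v) true = b :: rest from hbr)
            have hvmem : v ∈ PySem.Set.ofList (d.items.map Prod.snd) := by
              have : (PySem.Set.ofList (d.items.map Prod.snd)).Perm (b :: rest) :=
                (show PySem.List.sorted (PySem.Set.ofList (d.items.map Prod.snd))
                    (fun v : Int => v) true = b :: rest from hbr) ▸
                  (PySem.List.sorted_perm _ _ _).symm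
              exact this.mem_iff.2 (by rw [show pvVals d.items = b :: rest from hbr] at hv; exact hv)
            have := hble v hvmem
            simp only [decide_eq_true_eq]
            omega
        rw [hspec]
        simp [pvWorrdLoop, hmost, hmb]

def pvBuckets (l : List (String × Int)) : PySem.Dict Int (List String) :=
  l.foldl (fun b p => b.insert p.2 (b.getD p.2 [] ++ [p.1])) PySem.Dict.empty

theorem pvBuckets_swap (l : List (String × Int)) :
    pvBuckets l = (l.map (fun p => (p.2, p.1))).foldl
      (fun b p => b.modify p.1 [] (fun ws => ws ++ [p.2])) PySem.Dict.empty := by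
  rw [pvBuckets, List.foldl_map]
  rfl

theorem pvBuckets_keys (l : List (String × Int)) :
    (pvBuckets l).keys = PySem.Set.ofList (l.map Prod.snd) := by
  rw [pvBuckets_swap, PySem.Dict.keys_foldl_modify_key _ Prod.fst []
    (fun _ p => fun ws => ws ++ [p.2]) PySem.Dict.empty]
  simp only [List.map_map]
  rfl

theorem pvBuckets_nodup (l : List (String × Int)) : (pvBuckets l).keys.Nodup := by
  rw [pvBuckets_swap]
  exact PySem.Dict.nodup_keys_foldl_modify_key _ Prod.fst []
    (fun _ p => fun ws => ws ++ [p.2]) PySem.Dict.empty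
    (by simp [PySem.Dict.empty, PySem.Dict.keys])

theorem pvBuckets_getD (l : List (String × Int)) (c : Int) :
    (pvBuckets l).getD c [] = pvGroup l c := by
  rw [pvBuckets_swap, PySem.Dict.getD_foldl_modify_append]
  rw [show (l.map (fun p => (p.2, p.1))).filter (fun p => p.1 == c)
        = (l.filter (fun p => p.2 == c)).map (fun p => (p.2, p.1)) from
      List.filter_map (f := fun p : String × Int => (p.2, p.1)) (p := fun p : Int × String => p.1 == c)]
  simp [pvGroup, PySem.Dict.getD_empty, List.map_map, Function.comp_def]

theorem pvBuckets_items (l : List (String × Int)) :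
    (pvBuckets l).items
      = (PySem.Set.ofList (l.map Prod.snd)).map (fun c => (c, pvGroup l c)) := by
  rw [PySem.Dict.items_eq_map_keys (pvBuckets l) (pvBuckets_nodup l) [], pvBuckets_keys]
  exact List.map_congr_left (fun c _ => by rw [pvBuckets_getD l c])

theorem pvAlt_eq_spec (freq : List (String × Int)) (m : Int) :
    worrd_often_alt freq m = pvSpec (PySem.Dict.ofList freq).items m := by
  have h0 : worrd_often_alt freq m
      = ((PySem.List.sorted (pvBuckets (PySem.Dict.ofList freq).items).items
            (fun t => t.1) true).filter
          (fun t => decide (m ≤ t.1))).map (fun t => (t.2, t.1)) := rfl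
  rw [h0]
  set l := (PySem.Dict.ofList freq).items with hl
  have hsorted : PySem.List.sorted (pvBuckets l).items (fun t => t.1) true
      = (pvVals l).map (fun v => (v, pvGroup l v)) := by
    refine PySem.List.sorted_rev_eq_of_perm_of_pairwise_gt _ _ _ ?_ ?_
    · rw [pvBuckets_items]
      exact (PySem.List.sorted_perm _ _ _).map _
    · rw [List.pairwise_map]
      exact pvVals_pairwise l
  rw [hsorted, List.filter_map, List.map_map]
  rfl

theorem pvSet_foldl_len {α : Type} [BEq α] (l : List α) (s : PySem.Set α) :
    (l.foldl PySem.Set.add s).length ≤ s.length + l.length := by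
  induction l generalizing s with
  | nil => simp
  | cons x t ih =>
    simp only [List.foldl_cons]
    refine le_trans (ih _) ?_
    simp only [PySem.Set.add]
    split <;> simp <;> omega

theorem pvOfList_len (ps : List (String × Int)) :
    (PySem.Dict.ofList ps).items.length ≤ ps.length := by
  have h : ∀ (l : List (String × Int)) (d : PySem.Dict String Int),
      (l.foldl (fun acc p => acc.insert p.1 p.2) d).items.length ≤ d.items.length + l.length := by
    intro l
    induction l with
    | nil => simp
    | cons x t ih =>
      intro d
      simp only [List.foldl_cons]
      refine le_trans (ih _) ?_
      simp only [PySem.Dict.insert]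
      split <;> simp <;> omega
  simpa [PySem.Dict.ofList, PySem.Dict.update, PySem.Dict.empty] using h ps PySem.Dict.empty

-- ===== VERDICT (by name: the statement is the Claim_ definition above) =====
theorem worrd_often_spec : Claim_equal_worrd_often := by
  intro freq m _ _
  unfold Spec_worrd_often worrd_often
  rw [pvAlt_eq_spec]
  have hlen : (PySem.Set.ofList (PySem.Dict.ofList freq).values).length ≤ freq.length := by
    calc (PySem.Set.ofList (PySem.Dict.ofList freq).values).length
        ≤ 0 + (PySem.Dict.ofList freq).values.length := pvSet_foldl_len _ []
      _ = (PySem.Dict.ofList freq).items.length := by simp [PySem.Dict.values]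
      _ ≤ freq.length := pvOfList_len freq
  rw [pvLoop_eq_spec freq.length (freq.length + 1) _ m []
        (PySem.Dict.nodup_keys_ofList freq) hlen (Nat.lt_succ_self _)]
  simp
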